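-- pv_equiv track=rewrite | github.com/Dejong1706/-python | 5622.py | calltime
-- ===== SOURCE A (Python) =====
-- def calltime(s):
--     time = 0
--     for i in s:
--         for j in range(65,91):
--             if i == chr(j):
--                 if j < 68:
--                     time += 3
--                 elif j < 71:
--                     time += 4
--                 elif j < 74:
--                     time += 5
--                 elif j < 77:
--                     time += 6
--                 elif j < 80:
--                     time += 7
--                 elif j < 84:
--                     time += 8
--                 elif j < 87:
--                     time += 9
--                 elif j <= 90:
--                     time += 10
--     return time
-- ===== SOURCE B (Python) =====
-- def calltime(s):
--     total = 0
--     for c in s: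
--         k = ord(c) - 65
--         if 0 <= k <= 25:
--             total += 3 + (k - (k >= 18) - (k >= 25)) // 3
--     return total
-- ===== Notes on version B (the rewrite author's own statement) =====
-- stated objective: faster
-- what changed: Replaces the per-character scan over range(65,91) with its if/elif cascade by a closed-form arithmetic formula on ord(c): cost = 3 + (k - (k>=18) - (k>=25))//3 for k = ord(c)-65 in 0..25, where the two subtractions compensate for the four-letter PQRS and WXYZ buckets; no table and no scan at all.
import Mathlib
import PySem

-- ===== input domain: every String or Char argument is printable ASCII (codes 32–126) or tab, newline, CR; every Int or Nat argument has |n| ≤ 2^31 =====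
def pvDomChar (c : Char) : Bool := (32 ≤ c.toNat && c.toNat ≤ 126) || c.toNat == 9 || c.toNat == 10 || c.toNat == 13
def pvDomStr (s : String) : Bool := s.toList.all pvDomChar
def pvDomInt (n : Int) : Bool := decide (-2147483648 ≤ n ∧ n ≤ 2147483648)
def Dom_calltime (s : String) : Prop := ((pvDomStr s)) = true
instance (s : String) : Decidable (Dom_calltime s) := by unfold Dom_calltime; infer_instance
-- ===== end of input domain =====

-- B replaces A's per-character scan over range(65,91) with its if/elif cascade by a
-- closed-form arithmetic formula on the character code (objective: faster, a
-- constant-factor win; no table and no inner scan).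

-- ===== PORT A =====
def calltime (s : String) : Int :=
  s.toList.foldl (fun time i =>
    (PySem.List.pyRange 65 91 1).foldl (fun time j =>
      if i == Char.ofNat j.toNat then
        if j < 68 then time + 3
        else if j < 71 then time + 4
        else if j < 74 then time + 5
        else if j < 77 then time + 6
        else if j < 80 then time + 7
        else if j < 84 then time + 8
        else if j < 87 then time + 9
        else if j ≤ 90 then time + 10
        else time
      else time) time) 0

-- ===== PORT B =====
def calltime_alt (s : String) : Int :=
  s.toList.foldl (fun total c =>
    let k : Int := (c.toNat : Int) - 65
    if 0 ≤ k ∧ k ≤ 25 then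
      total + (3 + PySem.Int.floordiv
        (k - (if 18 ≤ k then 1 else 0) - (if 25 ≤ k then 1 else 0)) 3)
    else total) 0

-- ===== PRECONDITION & SPEC =====
def Spec_calltime (s : String) (out : Int) : Prop := out = calltime_alt s
instance (s : String) (out : Int) : Decidable (Spec_calltime s out) := by unfold Spec_calltime; infer_instance

-- ===== CLAIM (what is proved, stated in full; the proofs are below) =====
def Claim_equal_calltime : Prop := ∀ (s : String), Dom_calltime s → Spec_calltime s (calltime s)

-- ===== LEMMAS AND PROOFS =====

-- the per-step press-time increment of A's inner loop, as a function of the scanned code j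
def pvDelta (c : Char) (j : Int) : Int :=
  if c == Char.ofNat j.toNat then
    if j < 68 then 3
    else if j < 71 then 4
    else if j < 74 then 5
    else if j < 77 then 6
    else if j < 80 then 7
    else if j < 84 then 8
    else if j < 87 then 9
    else if j ≤ 90 then 10
    else 0
  else 0

-- B's per-character increment as a function of the character
def pvG (c : Char) : Int :=
  let k : Int := (c.toNat : Int) - 65
  if 0 ≤ k ∧ k ≤ 25 then
    3 + PySem.Int.floordiv (k - (if 18 ≤ k then 1 else 0) - (if 25 ≤ k then 1 else 0)) 3
  else 0

-- the total increment A's inner scan contributes for one character is B's formula value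
theorem sum_delta_eq_g (c : Char) :
    ((PySem.List.pyRange 65 91 1).map (pvDelta c)).sum = pvG c := by
  have pr : PySem.List.pyRange 65 91 1 = [(65 : Int), (66 : Int), (67 : Int), (68 : Int), (69 : Int), (70 : Int), (71 : Int), (72 : Int), (73 : Int), (74 : Int), (75 : Int), (76 : Int), (77 : Int), (78 : Int), (79 : Int), (80 : Int), (81 : Int), (82 : Int), (83 : Int), (84 : Int), (85 : Int), (86 : Int), (87 : Int), (88 : Int), (89 : Int), (90 : Int)] := by decide
  by_cases h1 : c = 'A'
  · subst h1; rw [pr]; decide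
  by_cases h2 : c = 'B'
  · subst h2; rw [pr]; decide
  by_cases h3 : c = 'C'
  · subst h3; rw [pr]; decide
  by_cases h4 : c = 'D'
  · subst h4; rw [pr]; decide
  by_cases h5 : c = 'E'
  · subst h5; rw [pr]; decide
  by_cases h6 : c = 'F'
  · subst h6; rw [pr]; decide
  by_cases h7 : c = 'G'
  · subst h7; rw [pr]; decide
  by_cases h8 : c = 'H'
  · subst h8; rw [pr]; decide
  by_cases h9 : c = 'I'
  · subst h9; rw [pr]; decide
  by_cases h10 : c = 'J'
  · subst h10; rw [pr]; decide
  by_cases h11 : c = 'K'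
  · subst h11; rw [pr]; decide
  by_cases h12 : c = 'L'
  · subst h12; rw [pr]; decide
  by_cases h13 : c = 'M'
  · subst h13; rw [pr]; decide
  by_cases h14 : c = 'N'
  · subst h14; rw [pr]; decide
  by_cases h15 : c = 'O'
  · subst h15; rw [pr]; decide
  by_cases h16 : c = 'P'
  · subst h16; rw [pr]; decide
  by_cases h17 : c = 'Q'
  · subst h17; rw [pr]; decide
  by_cases h18 : c = 'R'
  · subst h18; rw [pr]; decide
  by_cases h19 : c = 'S'
  · subst h19; rw [pr]; decide
  by_cases h20 : c = 'T'
  · subst h20; rw [pr]; decide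
  by_cases h21 : c = 'U'
  · subst h21; rw [pr]; decide
  by_cases h22 : c = 'V'
  · subst h22; rw [pr]; decide
  by_cases h23 : c = 'W'
  · subst h23; rw [pr]; decide
  by_cases h24 : c = 'X'
  · subst h24; rw [pr]; decide
  by_cases h25 : c = 'Y'
  · subst h25; rw [pr]; decide
  by_cases h26 : c = 'Z'
  · subst h26; rw [pr]; decide
  -- c is not an uppercase letter: both sides are 0
  have hc : c = Char.ofNat c.toNat := (Char.ofNat_toNat c).symm
  have hk : ¬ (65 ≤ c.toNat ∧ c.toNat ≤ 90) := by
    rintro ⟨hl, hu⟩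
    set n := c.toNat with hn
    interval_cases n <;>
      first
        | exact h1 (hc.trans rfl) | exact h2 (hc.trans rfl) | exact h3 (hc.trans rfl)
        | exact h4 (hc.trans rfl) | exact h5 (hc.trans rfl) | exact h6 (hc.trans rfl)
        | exact h7 (hc.trans rfl) | exact h8 (hc.trans rfl) | exact h9 (hc.trans rfl)
        | exact h10 (hc.trans rfl) | exact h11 (hc.trans rfl) | exact h12 (hc.trans rfl)
        | exact h13 (hc.trans rfl) | exact h14 (hc.trans rfl) | exact h15 (hc.trans rfl)
        | exact h16 (hc.trans rfl) | exact h17 (hc.trans rfl) | exact h18 (hc.trans rfl)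
        | exact h19 (hc.trans rfl) | exact h20 (hc.trans rfl) | exact h21 (hc.trans rfl)
        | exact h22 (hc.trans rfl) | exact h23 (hc.trans rfl) | exact h24 (hc.trans rfl)
        | exact h25 (hc.trans rfl) | exact h26 (hc.trans rfl)
  have hcond : ¬ (0 ≤ ((c.toNat : Int) - 65) ∧ ((c.toNat : Int) - 65) ≤ 25) := by omega
  have hg : pvG c = 0 := by
    unfold pvG; rw [if_neg hcond]
  rw [pr, hg]
  simp [pvDelta, List.map, beq_eq_false_iff_ne.mpr h1, beq_eq_false_iff_ne.mpr h2,
        beq_eq_false_iff_ne.mpr h3, beq_eq_false_iff_ne.mpr h4, beq_eq_false_iff_ne.mpr h5,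
        beq_eq_false_iff_ne.mpr h6, beq_eq_false_iff_ne.mpr h7, beq_eq_false_iff_ne.mpr h8,
        beq_eq_false_iff_ne.mpr h9, beq_eq_false_iff_ne.mpr h10, beq_eq_false_iff_ne.mpr h11,
        beq_eq_false_iff_ne.mpr h12, beq_eq_false_iff_ne.mpr h13, beq_eq_false_iff_ne.mpr h14,
        beq_eq_false_iff_ne.mpr h15, beq_eq_false_iff_ne.mpr h16, beq_eq_false_iff_ne.mpr h17,
        beq_eq_false_iff_ne.mpr h18, beq_eq_false_iff_ne.mpr h19, beq_eq_false_iff_ne.mpr h20,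
        beq_eq_false_iff_ne.mpr h21, beq_eq_false_iff_ne.mpr h22, beq_eq_false_iff_ne.mpr h23,
        beq_eq_false_iff_ne.mpr h24, beq_eq_false_iff_ne.mpr h25, beq_eq_false_iff_ne.mpr h26]

-- a fold whose body only adds a function of the element is the start plus the mapped sum
theorem pv_foldl_body (F : Int → Int → Int) (g : Int → Int)
    (h : ∀ a j, F a j = a + g j) :
    ∀ (l : List Int) (t : Int), l.foldl F t = t + (l.map g).sum := by
  intro l
  induction l with
  | nil => simp
  | cons x xs ih => intro t; simp only [List.foldl, List.map, List.sum_cons, h, ih]; ring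

-- A's inner loop over one character, starting from t, adds exactly B's formula value
theorem inner_eq_g (c : Char) (t : Int) :
    (PySem.List.pyRange 65 91 1).foldl (fun time j =>
      if c == Char.ofNat j.toNat then
        if j < 68 then time + 3
        else if j < 71 then time + 4
        else if j < 74 then time + 5
        else if j < 77 then time + 6
        else if j < 80 then time + 7
        else if j < 84 then time + 8
        else if j < 87 then time + 9
        else if j ≤ 90 then time + 10
        else time
      else time) t = t + pvG c := by
  have hbody : ∀ (time j : Int),
      (if c == Char.ofNat j.toNat then
        if j < 68 then time + 3
        else if j < 71 then time + 4
        else if j < 74 then time + 5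
        else if j < 77 then time + 6
        else if j < 80 then time + 7
        else if j < 84 then time + 8
        else if j < 87 then time + 9
        else if j ≤ 90 then time + 10
        else time
      else time) = time + pvDelta c j := by
    intro time j
    unfold pvDelta
    split_ifs <;> ring
  rw [pv_foldl_body _ (pvDelta c) hbody, sum_delta_eq_g]

theorem foldl_eq (l : List Char) (t : Int) :
    l.foldl (fun time i =>
      (PySem.List.pyRange 65 91 1).foldl (fun time j =>
        if i == Char.ofNat j.toNat then
          if j < 68 then time + 3
          else if j < 71 then time + 4
          else if j < 74 then time + 5
          else if j < 77 then time + 6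
          else if j < 80 then time + 7
          else if j < 84 then time + 8
          else if j < 87 then time + 9
          else if j ≤ 90 then time + 10
          else time
        else time) time) t
    = l.foldl (fun total c =>
        let k : Int := (c.toNat : Int) - 65
        if 0 ≤ k ∧ k ≤ 25 then
          total + (3 + PySem.Int.floordiv
            (k - (if 18 ≤ k then 1 else 0) - (if 25 ≤ k then 1 else 0)) 3)
        else total) t := by
  induction l generalizing t with
  | nil => rfl
  | cons c l ih =>
    rw [List.foldl_cons, List.foldl_cons, inner_eq_g]
    have : (fun total (c : Char) =>
        let k : Int := (c.toNat : Int) - 65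
        if 0 ≤ k ∧ k ≤ 25 then
          total + (3 + PySem.Int.floordiv
            (k - (if 18 ≤ k then 1 else 0) - (if 25 ≤ k then 1 else 0)) 3)
        else total) t c = t + pvG c := by
      simp only [pvG]
      split_ifs <;> ring
    rw [← this]
    exact ih _

-- ===== VERDICT (by name: the statement is the Claim_ definition above) =====
theorem calltime_spec : Claim_equal_calltime := by
  intro s _
  unfold Spec_calltime calltime calltime_alt
  exact foldl_eq s.toList 0
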